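-- pv_equiv track=rewrite | github.com/gabrielalmir/codecrafters-http-server-python | app/httplib/path.py | params
-- ===== SOURCE A (Python) =====
-- PathParam = dict[str, str]
--
-- def params(endpoint: str, target: str) -> PathParam:
--     paths = endpoint.split('/')
--     targets = target.split('/')
--
--     if len(paths) != len(targets):
--         return {}
--
--     path_params = {}
--
--     for idx, path in enumerate(paths):
--         if path.startswith('{') and path.endswith('}'):
--             path_var = path.replace('{', '').replace('}', '')
--             path_params[path_var] = targets[idx]
--         elif path != targets[idx]:
--             return {}
--
--     return path_params
-- ===== SOURCE B (Python) =====
-- def params(endpoint: str, target: str) -> dict: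
--     # Streaming matcher: consume one segment at a time from both strings with
--     # str.partition('/'); no split lists, no length pre-check, no zip.
--     out = {}
--     ep, tg = endpoint, target
--     while True:
--         seg, sep_e, ep = ep.partition('/')
--         val, sep_t, tg = tg.partition('/')
--         if sep_e != sep_t:
--             return {}  # one side ran out of segments first: segment counts differ
--         if seg.startswith('{') and seg.endswith('}'):
--             out[seg.replace('{', '').replace('}', '')] = val
--         elif seg != val:
--             return {}
--         if not sep_e:
--             return out
-- ===== Notes on version B (the rewrite author's own statement) =====
-- stated objective: alternative
-- what changed: Replaces A's split-both-strings, length pre-check and indexed loop over the split lists by a streaming two-cursor matcher that repeatedly str.partition('/')s both strings, consuming one segment at a time and detecting a segment-count mismatch when exactly one side runs out of separators; no split lists are ever materialized.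
import Mathlib
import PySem

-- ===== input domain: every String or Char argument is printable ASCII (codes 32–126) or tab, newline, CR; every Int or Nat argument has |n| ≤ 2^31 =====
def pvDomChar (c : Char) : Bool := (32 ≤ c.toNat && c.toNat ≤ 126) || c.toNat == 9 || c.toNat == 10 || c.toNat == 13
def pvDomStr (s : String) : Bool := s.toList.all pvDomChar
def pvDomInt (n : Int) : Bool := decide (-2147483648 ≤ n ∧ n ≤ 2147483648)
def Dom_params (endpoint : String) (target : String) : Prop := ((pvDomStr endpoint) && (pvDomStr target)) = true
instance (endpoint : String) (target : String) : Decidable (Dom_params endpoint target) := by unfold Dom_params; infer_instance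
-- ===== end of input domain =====

-- B replaces A's split-both-strings + length pre-check + indexed loop by a streaming
-- two-cursor matcher (repeated str.partition('/')); same return value everywhere.

-- ===== PORT A =====
-- s.split('/'): the separator is the nonempty literal "/", so split? is always some
def splitSlash (s : String) : List String := (PySem.Str.split? s "/").getD []

-- path.replace('{', '').replace('}', '')
def stripBraces (p : String) : String :=
  PySem.Str.replace (PySem.Str.replace p "{" "") "}" ""

-- path.startswith('{') and path.endswith('}')
def isVar (p : String) : Bool :=
  PySem.Str.startswith p "{" && PySem.Str.endswith p "}"

-- A's loop over enumerate(paths) with targets[idx]: lengths are equal when the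
-- loop is reached, so it walks the zipped pairs; 'return {}' is the none branch.
def paramsLoop : List (String × String) → PySem.Dict String String →
    Option (PySem.Dict String String)
  | [], d => some d
  | (p, t) :: rest, d =>
    if isVar p then paramsLoop rest (d.insert (stripBraces p) t)
    else if p != t then none
    else paramsLoop rest d

def params (endpoint : String) (target : String) : List (String × String) :=
  let paths := splitSlash endpoint
  let targets := splitSlash target
  if paths.length ≠ targets.length then []
  else
    match paramsLoop (paths.zip targets) PySem.Dict.empty with
    | none => []
    | some d => d.items

-- ===== PORT B =====
-- s.partition('/') for the single-character separator, ported by hand over the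
-- char list (PySem has no partition): (before first '/', was a '/' found, rest).
-- Exact: Python's partition splits at the FIRST occurrence, which is this recursion.
def partSlash : List Char → List Char × Bool × List Char
  | [] => ([], false, [])
  | c :: rest =>
    if c = '/' then ([], true, rest)
    else
      let (a, b, r) := partSlash rest
      (c :: a, b, r)

-- termination measure for goB's while-loop: a found '/' consumes at least one char
theorem partSlash_true_lt : ∀ (cs a r : List Char), partSlash cs = (a, true, r) →
    r.length < cs.length := by
  intro cs
  induction cs with
  | nil => intro a r h; simp [partSlash] at h
  | cons c rest ih =>
    intro a r h
    by_cases hc : c = '/'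
    · simp [partSlash, hc] at h
      simp [h.2]
    · rcases hps : partSlash rest with ⟨a', b', r'⟩
      simp only [partSlash, if_neg hc, hps, Prod.mk.injEq] at h
      obtain ⟨h1, h2, h3⟩ := h
      subst h2 h3
      have := ih _ _ hps
      simp only [List.length_cons]
      omega

-- seg.startswith('{') and seg.endswith('}') (char level)
def isVarC (p : List Char) : Bool :=
  PySem.Chars.startswith p ['{'] && PySem.Chars.endswith p ['}']

-- seg.replace('{', '').replace('}', '') (char level)
def stripBracesC (p : List Char) : List Char :=
  PySem.Chars.replace (PySem.Chars.replace p ['{'] []) ['}'] []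

-- the while-True loop of B: one partition step on each cursor per iteration
def goB (ep tg : List Char) (out : PySem.Dict String String) :
    Option (PySem.Dict String String) :=
  match hep : partSlash ep, partSlash tg with
  | (seg, se, ep'), (val, st, tg') =>
    if se != st then none
    else
      match (if isVarC seg then
               some (out.insert (String.ofList (stripBracesC seg)) (String.ofList val))
             else if seg != val then none
             else some out) with
      | none => none
      | some out' => if hse : se = true then goB ep' tg' out' else some out'
termination_by ep.length
decreasing_by exact partSlash_true_lt ep seg ep' (hse ▸ hep)

def params_alt (endpoint : String) (target : String) : List (String × String) :=
  match goB endpoint.toList target.toList PySem.Dict.empty with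
  | none => []
  | some d => d.items

-- ===== PRECONDITION & SPEC =====
def Spec_params (endpoint : String) (target : String) (out : List (String × String)) : Prop := out = params_alt endpoint target
instance (endpoint : String) (target : String) (out : List (String × String)) : Decidable (Spec_params endpoint target out) := by unfold Spec_params; infer_instance

-- ===== CLAIM (what is proved, stated in full; the proofs are below) =====
def Claim_equal_params : Prop := ∀ (endpoint : String) (target : String), Dom_params endpoint target → Spec_params endpoint target (params endpoint target)

-- ===== LEMMAS AND PROOFS =====

-- proof-side: the list of '/'-separated segments, via partSlash
def segs (cs : List Char) : List (List Char) :=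
  match hps : partSlash cs with
  | (a, true, r) => a :: segs r
  | (a, false, _) => [a]
termination_by cs.length
decreasing_by exact partSlash_true_lt cs a r hps

-- proof-side: A's loop at char level
def loopC : List (List Char × List Char) → PySem.Dict String String →
    Option (PySem.Dict String String)
  | [], d => some d
  | (p, t) :: rest, d =>
    if isVarC p then loopC rest (d.insert (String.ofList (stripBracesC p)) (String.ofList t))
    else if p != t then none
    else loopC rest d

theorem segs_ne_nil (cs : List Char) : segs cs ≠ [] := by
  unfold segs
  rcases hps : partSlash cs with ⟨a, b, r⟩
  cases b <;> simp

-- prepend pre to the first segment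
def prep (pre : List Char) : List (List Char) → List (List Char)
  | [] => [pre]
  | s :: rest => (pre ++ s) :: rest

theorem segs_def (cs : List Char) : segs cs =
    match partSlash cs with
    | (a, true, r) => a :: segs r
    | (a, false, _) => [a] := by
  rw [segs]
  rcases hps : partSlash cs with ⟨a, b, r⟩
  cases b <;> simp

theorem segs_nil : segs [] = [[]] := by
  rw [segs_def]; simp [partSlash]

theorem segs_slash (rest : List Char) : segs ('/' :: rest) = [] :: segs rest := by
  rw [segs_def]; simp [partSlash]

theorem segs_cons_ne (c : Char) (rest : List Char) (hc : c ≠ '/') :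
    segs (c :: rest) = prep [c] (segs rest) := by
  rw [segs_def (c :: rest), segs_def rest]
  rcases hps : partSlash rest with ⟨a, b, r⟩
  simp only [partSlash, if_neg hc, hps]
  cases b <;> simp [prep]

theorem go_eq_segs : ∀ (fuel : Nat) (l cur : List Char) (acc : List (List Char)),
    l.length ≤ fuel →
    PySem.Chars.splitOn.go ['/'] fuel l cur acc = acc.reverse ++ prep cur.reverse (segs l) := by
  intro fuel
  induction fuel with
  | zero =>
    intro l cur acc h
    have hl : l = [] := List.length_eq_zero_iff.mp (Nat.le_zero.mp h)
    subst hl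
    simp only [PySem.Chars.splitOn.go]
    simp [segs_nil, prep]
  | succ fuel ih =>
    intro l cur acc h
    cases l with
    | nil =>
      simp only [PySem.Chars.splitOn.go]
      simp [segs_nil, prep]
    | cons c rest =>
      simp only [PySem.Chars.splitOn.go]
      by_cases hc : c = '/'
      · subst hc
        have hpre : (['/'].isPrefixOf ('/' :: rest)) = true := by simp [List.isPrefixOf]
        rw [if_pos hpre]
        have hdrop : List.drop (['/'] : List Char).length ('/' :: rest) = rest := rfl
        rw [hdrop, ih rest [] (cur.reverse :: acc) (by simpa using h), segs_slash]
        rcases hseg : segs rest with _ | ⟨s, ss⟩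
        · exact absurd hseg (segs_ne_nil rest)
        · simp [prep]
      · have hpre : (['/'].isPrefixOf (c :: rest)) = false := by
          simp [List.isPrefixOf]
          exact fun hh => absurd hh.symm hc
        simp only [hpre, if_false, Bool.false_eq_true]
        rw [ih rest (c :: cur) acc (by simpa using h)]
        rw [segs_cons_ne c rest hc]
        rcases hseg : segs rest with _ | ⟨s, ss⟩
        · exact absurd hseg (segs_ne_nil rest)
        · simp [prep]

theorem splitOn_eq_segs (cs : List Char) :
    PySem.Chars.splitOn cs ['/'] = segs cs := by
  unfold PySem.Chars.splitOn
  rw [go_eq_segs (cs.length + 1) cs [] [] (by omega)]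
  rcases hseg : segs cs with _ | ⟨s, ss⟩
  · exact absurd hseg (segs_ne_nil cs)
  · simp [prep]

theorem splitSlash_eq (s : String) :
    splitSlash s = (segs s.toList).map String.ofList := by
  simp [splitSlash, PySem.Str.split?, PySem.Chars.split?, splitOn_eq_segs,
    show ("/" : String).toList = ['/'] from rfl]

theorem isVar_ofList (a : List Char) : isVar (String.ofList a) = isVarC a := by
  simp [isVar, isVarC, PySem.Str.startswith, PySem.Str.endswith]

theorem stripBraces_ofList (a : List Char) :
    stripBraces (String.ofList a) = String.ofList (stripBracesC a) := by
  simp [stripBraces, stripBracesC, PySem.Str.replace]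

theorem ofList_eq_iff (a b : List Char) : String.ofList a = String.ofList b ↔ a = b :=
  ⟨fun h => by simpa using congrArg String.toList h, fun h => h ▸ rfl⟩

theorem paramsLoop_eq_loopC :
    ∀ (pairs : List (List Char × List Char)) (d : PySem.Dict String String),
    paramsLoop (pairs.map (Prod.map String.ofList String.ofList)) d =
      loopC pairs d := by
  intro pairs
  induction pairs with
  | nil => intro d; rfl
  | cons pt rest ih =>
    intro d
    obtain ⟨p, t⟩ := pt
    simp only [List.map_cons, Prod.map, paramsLoop, loopC, isVar_ofList, stripBraces_ofList]
    by_cases hv : isVarC p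
    · simp [hv, ih]
    · by_cases he : p = t
      · simp [he, ih]
      · simp only [hv, if_false, Bool.false_eq_true]
        have : (String.ofList p != String.ofList t) = true := by
          simp [bne, ofList_eq_iff, he]
        simp [this, he]

theorem goB_def (ep tg : List Char) (out : PySem.Dict String String) :
    goB ep tg out =
      match partSlash ep, partSlash tg with
      | (seg, se, ep'), (val, st, tg') =>
        if se != st then none
        else
          match (if isVarC seg then
                   some (out.insert (String.ofList (stripBracesC seg)) (String.ofList val))
                 else if seg != val then none
                 else some out) with
          | none => none
          | some out' => if se = true then goB ep' tg' out' else some out' := by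
  rw [goB]
  rcases partSlash ep with ⟨seg, se, ep'⟩
  rcases partSlash tg with ⟨val, st, tg'⟩
  cases se <;> cases st <;> simp

theorem segs_of_partSlash_false (cs seg r : List Char) (h : partSlash cs = (seg, false, r)) :
    segs cs = [seg] := by
  rw [segs_def, h]

theorem segs_of_partSlash_true (cs seg r : List Char) (h : partSlash cs = (seg, true, r)) :
    segs cs = seg :: segs r := by
  rw [segs_def, h]

theorem goB_aux : ∀ (n : Nat) (ep tg : List Char) (out : PySem.Dict String String),
    ep.length < n →
    goB ep tg out =
      if (segs ep).length ≠ (segs tg).length then none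
      else loopC ((segs ep).zip (segs tg)) out := by
  intro n
  induction n with
  | zero => intro ep tg out h; omega
  | succ n ih =>
    intro ep tg out h
    rw [goB_def]
    rcases hep : partSlash ep with ⟨seg, se, ep'⟩
    rcases htg : partSlash tg with ⟨val, st, tg'⟩
    cases se <;> cases st <;> dsimp only
    · -- both strings are on their final segment
      rw [segs_of_partSlash_false ep seg ep' hep, segs_of_partSlash_false tg val tg' htg]
      rw [if_neg (by simp : ¬ ((false : Bool) != false) = true)]
      rw [if_neg (by simp : ¬ ([seg].length ≠ [val].length))]
      by_cases hv : isVarC seg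
      · rw [if_pos hv]
        simp [loopC, hv]
      · rw [if_neg hv]
        by_cases he : seg = val
        · have hv' : ¬ isVarC val = true := he ▸ hv
          rw [if_neg (by simp [bne, he] : ¬ (seg != val) = true)]
          simp [loopC, hv', he]
        · rw [if_pos (by simp [bne, he] : (seg != val) = true)]
          simp [loopC, hv, he]
    · -- endpoint exhausted, target still has a '/': counts differ
      rw [segs_of_partSlash_false ep seg ep' hep, segs_of_partSlash_true tg val tg' htg]
      have hlen : (segs tg').length ≠ 0 := by
        simpa [List.length_eq_zero_iff] using segs_ne_nil tg'
      rw [if_pos (by simp : ((false : Bool) != true) = true)]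
      rw [if_pos (by simp only [List.length_cons, List.length_nil]; omega :
        [seg].length ≠ (val :: segs tg').length)]
    · -- target exhausted, endpoint still has a '/': counts differ
      rw [segs_of_partSlash_true ep seg ep' hep, segs_of_partSlash_false tg val tg' htg]
      have hlen : (segs ep').length ≠ 0 := by
        simpa [List.length_eq_zero_iff] using segs_ne_nil ep'
      rw [if_pos (by simp : ((true : Bool) != false) = true)]
      rw [if_pos (by simp only [List.length_cons, List.length_nil]; omega :
        (seg :: segs ep').length ≠ [val].length)]
    · -- one segment consumed on each side, keep walking
      rw [segs_of_partSlash_true ep seg ep' hep, segs_of_partSlash_true tg val tg' htg]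
      have hlt : ep'.length < n := by
        have := partSlash_true_lt ep seg ep' hep
        omega
      rw [if_neg (by simp : ¬ ((true : Bool) != true) = true)]
      have hcond : ((seg :: segs ep').length ≠ (val :: segs tg').length) =
          ((segs ep').length ≠ (segs tg').length) := by
        simp only [List.length_cons]
        exact propext ⟨fun hh => by omega, fun hh => by omega⟩
      by_cases hv : isVarC seg
      · rw [if_pos hv]
        dsimp only
        rw [ih ep' tg' (out.insert (String.ofList (stripBracesC seg)) (String.ofList val)) hlt]
        simp only [if_true]
        simp only [List.zip_cons_cons, loopC, hv, if_true, hcond]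
      · rw [if_neg hv]
        by_cases he : seg = val
        · rw [if_neg (by simp [bne, he] : ¬ (seg != val) = true)]
          dsimp only
          rw [ih ep' tg' out hlt]
          simp only [if_true]
          simp only [List.zip_cons_cons, loopC, hv, Bool.false_eq_true, if_false,
            if_neg (by simp [bne, he] : ¬ (seg != val) = true), hcond]
        · rw [if_pos (by simp [bne, he] : (seg != val) = true)]
          have : loopC ((seg, val) :: (segs ep').zip (segs tg')) out = none := by
            simp [loopC, hv, bne, he]
          rw [List.zip_cons_cons, this]
          by_cases hl : (seg :: segs ep').length ≠ (val :: segs tg').length <;> simp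
theorem goB_eq_loopC (ep tg : List Char) (out : PySem.Dict String String) :
    goB ep tg out =
      if (segs ep).length ≠ (segs tg).length then none
      else loopC ((segs ep).zip (segs tg)) out :=
  goB_aux (ep.length + 1) ep tg out (by omega)

-- ===== VERDICT (by name: the statement is the Claim_ definition above) =====
theorem params_spec : Claim_equal_params := by
  intro e t _
  show params e t = params_alt e t
  simp only [params, params_alt, splitSlash_eq, goB_eq_loopC, List.length_map]
  rw [List.zip_map, paramsLoop_eq_loopC]
  by_cases h : (segs e.toList).length = (segs t.toList).length
  · rw [if_neg (by omega), if_neg (by omega)]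
  · rw [if_pos (by omega), if_pos (by omega)]
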